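-- pv_equiv track=rewrite | github.com/DassHydro/smash | smash/core/model/_read_input_data.py | _build_date_regex_pattern
-- ===== SOURCE A (Python) =====
-- def _build_date_regex_pattern(date_pattern) -> str:
--     # Supported date formatters
--     datefmt = {"%Y": 4, "%m": 2, "%d": 2, "%H": 2, "%M": 2, "%S": 2}
--
--     regex = ""
--     i = 0
--     while i < len(date_pattern):
--         if date_pattern[i : i + 2] in datefmt:
--             regex += r"\d{" + str(datefmt[date_pattern[i : i + 2]]) + "}"
--             i = i + 2
--         else:
--             regex += r"\\" + date_pattern[i]
--             i = i + 1
--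
--     return regex
-- ===== SOURCE B (Python) =====
-- import re
--
--
-- def _build_date_regex_pattern(date_pattern) -> str:
--     # Supported date formatters
--     datefmt = {"%Y": 4, "%m": 2, "%d": 2, "%H": 2, "%M": 2, "%S": 2}
--
--     # Let the regex engine tokenize the pattern: a formatter key, or any single char.
--     token_re = re.compile("|".join(map(re.escape, datefmt)) + "|.", re.DOTALL)
--
--     def repl(m):
--         tok = m.group()
--         if tok in datefmt:
--             return r"\d{" + str(datefmt[tok]) + "}"
--         return r"\\" + tok
--
--     return token_re.sub(repl, date_pattern)
-- ===== Notes on version B (the rewrite author's own statement) =====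
-- stated objective: idiomatic
-- what changed: Replaces the manual index-based while loop with two-character lookahead by a single re.sub whose pattern is the alternation of the six formatter keys followed by a catch-all dot (re.DOTALL), letting the regex engine tokenize the string and a replacement callback map each token; this also avoids A's repeated quadratic string concatenation.
import Mathlib
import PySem

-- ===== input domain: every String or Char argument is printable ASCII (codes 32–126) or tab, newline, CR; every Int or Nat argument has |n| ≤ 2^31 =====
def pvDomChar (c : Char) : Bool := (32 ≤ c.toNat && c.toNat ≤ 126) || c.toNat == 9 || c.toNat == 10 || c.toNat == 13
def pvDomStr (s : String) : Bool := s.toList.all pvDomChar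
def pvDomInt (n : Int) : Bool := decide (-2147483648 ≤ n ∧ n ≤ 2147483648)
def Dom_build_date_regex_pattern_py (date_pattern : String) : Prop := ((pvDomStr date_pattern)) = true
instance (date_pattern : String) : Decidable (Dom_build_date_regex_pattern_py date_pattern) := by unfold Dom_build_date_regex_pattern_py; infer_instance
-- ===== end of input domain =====

-- B tokenizes the whole pattern with one regex (formatter keys | any char) and maps each
-- token to its replacement, instead of A's index-driven while loop; objective: idiomatic.

-- ===== PORT A =====
-- the dict `datefmt` (literal keys, int values); `.lookup` = membership test / key lookup
def pvDatefmt : List (List Char × Int) :=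
  [(['%','Y'], 4), (['%','m'], 2), (['%','d'], 2), (['%','H'], 2), (['%','M'], 2), (['%','S'], 2)]

-- the while loop: acc = `regex`, the list is the suffix `date_pattern[i:]`;
-- `date_pattern[i:i+2] in datefmt` + `datefmt[...]` is the single `.lookup` match
def pvGoA : List Char → List Char → List Char
  | acc, c1 :: c2 :: rest =>
    match pvDatefmt.lookup [c1, c2] with
    | some n => pvGoA (acc ++ (['\\','d','{'] ++ PySem.Int.toChars n ++ ['}'])) rest
    | none   => pvGoA (acc ++ ['\\','\\', c1]) (c2 :: rest)
  | acc, [c] => acc ++ ['\\','\\', c]   -- slice [i:i+2] has length 1: never a formatter key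
  | acc, [] => acc

def build_date_regex_pattern_py (date_pattern : String) : String :=
  String.ofList (pvGoA [] date_pattern.toList)

-- ===== PORT B =====
-- hand port of the regex engine on the pattern "%Y|%m|%d|%H|%M|%S|." (re.DOTALL):
-- at each position the first matching alternative wins — a formatter key, else one char
def pvTok : List Char → List (List Char)
  | c1 :: c2 :: rest =>
    match pvDatefmt.lookup [c1, c2] with
    | some _ => [c1, c2] :: pvTok rest
    | none   => [c1] :: pvTok (c2 :: rest)
  | [c] => [[c]]
  | [] => []

-- the replacement callback `repl`
def pvRepl (t : List Char) : List Char :=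
  match pvDatefmt.lookup t with
  | some n => ['\\','d','{'] ++ PySem.Int.toChars n ++ ['}']
  | none   => ['\\','\\'] ++ t

def build_date_regex_pattern_py_alt (date_pattern : String) : String :=
  String.ofList (((pvTok date_pattern.toList).map pvRepl).flatten)

-- ===== PRECONDITION & SPEC =====
def Spec_build_date_regex_pattern_py (date_pattern : String) (out : String) : Prop := out = build_date_regex_pattern_py_alt date_pattern
instance (date_pattern : String) (out : String) : Decidable (Spec_build_date_regex_pattern_py date_pattern out) := by unfold Spec_build_date_regex_pattern_py; infer_instance

-- ===== CLAIM (what is proved, stated in full; the proofs are below) =====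
def Claim_equal_build_date_regex_pattern_py : Prop := ∀ (date_pattern : String), Dom_build_date_regex_pattern_py date_pattern → Spec_build_date_regex_pattern_py date_pattern (build_date_regex_pattern_py date_pattern)

-- ===== LEMMAS AND PROOFS =====

-- every key of `datefmt` has two characters, so a one-character slice is never a key
theorem pvLookup_single (c : Char) : pvDatefmt.lookup [c] = none := by
  simp [pvDatefmt, List.lookup]

-- A's accumulator loop emits, per token, exactly B's replacement string
theorem pvGoA_eq_tok (cs : List Char) : ∀ acc : List Char,
    pvGoA acc cs = acc ++ ((pvTok cs).map pvRepl).flatten := by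
  induction cs using pvTok.induct with
  | case1 c1 c2 rest n h ih =>
      intro acc
      simp [pvGoA, pvTok, h, ih, pvRepl]
  | case2 c1 c2 rest h ih =>
      intro acc
      simp [pvGoA, pvTok, h, ih, pvRepl, pvLookup_single]
  | case3 c =>
      intro acc
      simp [pvGoA, pvTok, pvRepl, pvLookup_single]
  | case4 =>
      intro acc
      simp [pvGoA, pvTok]

-- ===== VERDICT (by name: the statement is the Claim_ definition above) =====
theorem build_date_regex_pattern_py_spec : Claim_equal_build_date_regex_pattern_py := by
  intro s _
  show _ = _
  simp [build_date_regex_pattern_py, build_date_regex_pattern_py_alt, pvGoA_eq_tok]
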